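-- pv_equiv track=rewrite | github.com/Anfany/Codility-Lessons-By-Python3 | L91_Tasks from Indeed Prime 2016 challenge/plot_maze_for_p91.3.py | hilbert_maze_array
-- ===== SOURCE A (Python) =====
-- def hilbert_maze_array(n):
--     """
--     根据大小为N=1的迷宫的数组，生成大小为N=n的迷宫的数组
--     :param n: 迷宫大小的n
--     :return: 返回N=n的迷宫的数组
--     """
--     #  首先构造n=1时的迷宫
--     maze_list = [[0, 0, 0, 0, 0], [0, 1, 1, 1, 0], [0, 1, 0, 1, 0], [0, 1, 0, 1, 0], [0, 0, 0, 0, 0]]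
--     if n == 1:
--         return maze_list
--     else:
--         m = 1
--         while m < n:
--             #  上半部分是2个一样的
--             up = []
--             for i in maze_list:
--                 up.append(i + i[1:])
--
--             #  左下角的迷宫是小迷宫顺时针旋转90度构成的
--             left_down = list(map(list, zip(*maze_list[::-1])))
--             #  右下角的迷宫是逆时针旋转90度构成的
--             right_down = list(map(list, zip(*maze_list)))[::-1]
--
--             down = []
--             for l, r in zip(left_down, right_down):
--                 down.append(l + r[1:])
--
--             # 上下合并
--             merge = up + down[1:]
--
--             m += 1
--             #  小迷宫相交处添加石块
--             merge[2**m][1] = 1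
--             merge[2**m-1][2**m] = 1
--             merge[2**m][2**(m+1)-1] = 1
--
--             maze_list = merge.copy()
--         return maze_list
-- ===== SOURCE B (Python) =====
-- def hilbert_maze_array(n):
--     # recursion over the self-similar structure: the doubled maze's bottom rows are
--     # read directly out of the smaller maze by index (no zip/transpose rotations)
--     if n <= 1:
--         return [[0, 0, 0, 0, 0], [0, 1, 1, 1, 0], [0, 1, 0, 1, 0], [0, 1, 0, 1, 0], [0, 0, 0, 0, 0]]
--     prev = hilbert_maze_array(n - 1)
--     s = len(prev)
--     rev = prev[::-1]
--     res = [row + row[1:] for row in prev]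
--     for ii in range(1, s):
--         res.append([r[ii] for r in rev] + [r[s - 1 - ii] for r in prev][1:])
--     res[s - 1][1] = 1
--     res[s - 2][s - 1] = 1
--     res[s - 1][2 * s - 3] = 1
--     return res
-- ===== Notes on version B (the rewrite author's own statement) =====
-- stated objective: alternative
-- what changed: B replaces A's while-loop, which forms the bottom half by two zip-transpose rotations of the whole maze and zips them row-pairwise, with a structural recursion on n that reads each bottom row of the doubled maze directly out of the smaller maze by index.
import Mathlib
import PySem

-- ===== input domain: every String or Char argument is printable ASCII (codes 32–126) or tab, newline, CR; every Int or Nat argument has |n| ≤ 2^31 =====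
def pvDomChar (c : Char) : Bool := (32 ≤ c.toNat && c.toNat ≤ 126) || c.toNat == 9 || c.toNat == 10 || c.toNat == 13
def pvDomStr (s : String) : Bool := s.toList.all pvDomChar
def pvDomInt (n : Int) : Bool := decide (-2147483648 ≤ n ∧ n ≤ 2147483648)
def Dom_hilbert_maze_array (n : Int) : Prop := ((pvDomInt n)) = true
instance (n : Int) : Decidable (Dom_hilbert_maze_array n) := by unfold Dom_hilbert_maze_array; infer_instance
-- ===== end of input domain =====

-- B replaces A's while-loop of zip-transpose rotations by structural recursion that builds the
-- doubled maze's bottom rows directly by index from the smaller maze (objective: alternative).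

-- ===== PORT A =====

-- the N=1 maze literal
def pvBase : List (List Int) := [[0, 0, 0, 0, 0], [0, 1, 1, 1, 0], [0, 1, 0, 1, 0], [0, 1, 0, 1, 0], [0, 0, 0, 0, 0]]

-- zip(*rows): columns up to the shortest row (exact: stops as soon as some row is exhausted)
def pvTZip : List (List Int) → List (List Int)
  | [] => []
  | r :: rs =>
    if r.isEmpty || rs.any (·.isEmpty) then []
    else (r.headD 0 :: rs.map (·.headD 0)) :: pvTZip (r.tail :: rs.map (·.tail))
termination_by rows => (rows.headD []).length
decreasing_by
  rename_i h
  simp only [Bool.or_eq_true, List.isEmpty_iff, not_or] at h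
  cases r with
  | nil => simp at h
  | cons a t => simp [List.headD]

-- one iteration of A's while-loop, with m already incremented to mm (Python: m += 1 happens
-- before the stone assignments).  xs[1:] on these lists is List.tail; the three assigned
-- indices are always in range for the mazes the loop builds, so List.modify/List.set is exact.
def pvStepA (maze : List (List Int)) (mm : Nat) : List (List Int) :=
  let up := maze.map (fun i => i ++ i.tail)
  let left_down := pvTZip maze.reverse
  let right_down := (pvTZip maze).reverse
  let down := List.zipWith (fun l r => l ++ r.tail) left_down right_down
  let merge := up ++ down.tail
  let merge := merge.modify (2 ^ mm) (fun row => row.set 1 1)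
  let merge := merge.modify (2 ^ mm - 1) (fun row => row.set (2 ^ mm) 1)
  let merge := merge.modify (2 ^ mm) (fun row => row.set (2 ^ (mm + 1) - 1) 1)
  merge

-- the while m < n loop
def pvLoopA (n m : Int) (maze : List (List Int)) : List (List Int) :=
  if m < n then pvLoopA n (m + 1) (pvStepA maze (m + 1).toNat)
  else maze
termination_by (n - m).toNat
decreasing_by omega

def hilbert_maze_array (n : Int) : List (List Int) :=
  if n = 1 then pvBase else pvLoopA n 1 pvBase

-- ===== PORT B =====

-- Source B builds the result list by a comprehension for the top rows and a loop of appends for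
-- the bottom rows; the append loop over range(1, s) is ported as a map over List.range' 1 (s-1).
-- r[k] in Source B is always in range on these rectangular mazes, so List.getD is exact;
-- xs[1:] is List.tail; the three assigned stone indices are always in range, so modify/set is exact.
def hilbert_maze_array_alt (n : Int) : List (List Int) :=
  if n ≤ 1 then pvBase
  else
    let prev := hilbert_maze_array_alt (n - 1)
    let s := prev.length
    let rev := prev.reverse
    let res := prev.map (fun row => row ++ row.tail)
      ++ (List.range' 1 (s - 1)).map (fun ii =>
           rev.map (fun r => r.getD ii 0) ++ (prev.map (fun r => r.getD (s - 1 - ii) 0)).tail)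
    let res := res.modify (s - 1) (fun row => row.set 1 1)
    let res := res.modify (s - 2) (fun row => row.set (s - 1) 1)
    let res := res.modify (s - 1) (fun row => row.set (2 * s - 3) 1)
    res
termination_by n.toNat
decreasing_by omega

-- ===== PRECONDITION & SPEC =====
def Spec_hilbert_maze_array (n : Int) (out : List (List Int)) : Prop := out = hilbert_maze_array_alt n
instance (n : Int) (out : List (List Int)) : Decidable (Spec_hilbert_maze_array n out) := by unfold Spec_hilbert_maze_array; infer_instance

-- ===== CLAIM (what is proved, stated in full; the proofs are below) =====
def Claim_equal_hilbert_maze_array : Prop := ∀ (n : Int), Dom_hilbert_maze_array n → Spec_hilbert_maze_array n (hilbert_maze_array n)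

-- ===== LEMMAS AND PROOFS =====

-- a matrix is rectangular of side s
def pvRect (M : List (List Int)) (s : Nat) : Prop := M.length = s ∧ ∀ r ∈ M, r.length = s

-- zip(*M) of a rectangular nonempty M is the list of columns
theorem pv_tzip_spec (c : Nat) : ∀ M : List (List Int), M ≠ [] → (∀ r ∈ M, r.length = c) →
    pvTZip M = (List.range c).map (fun j => M.map (fun r => r.getD j 0)) := by
  induction c with
  | zero =>
    intro M hne hlen
    match M with
    | r :: rs =>
      have hr : r = [] := List.length_eq_zero_iff.mp (hlen r (by simp))
      rw [pvTZip]
      simp [hr]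
  | succ c ih =>
    intro M hne hlen
    match M with
    | r :: rs =>
      have hr : ¬ r.isEmpty := by
        have := hlen r (by simp); cases r <;> simp_all
      have hrs : ¬ rs.any (·.isEmpty) := by
        intro hcontra
        rw [List.any_eq_true] at hcontra
        obtain ⟨x, hx, hxe⟩ := hcontra
        have := hlen x (List.mem_cons_of_mem _ hx)
        rw [List.isEmpty_iff] at hxe; subst hxe; simp at this
      rw [pvTZip, if_neg (by simp_all)]
      rw [ih (r.tail :: rs.map (·.tail)) (by simp) ?hl]
      case hl =>
        intro x hx
        rw [List.mem_cons] at hx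
        rcases hx with rfl | hx
        · have h1 := hlen r (by simp)
          rw [List.length_tail, h1]; omega
        · rw [List.mem_map] at hx
          obtain ⟨y, hy, rfl⟩ := hx
          have h1 := hlen y (List.mem_cons_of_mem _ hy)
          rw [List.length_tail, h1]; omega
      rw [List.range_succ_eq_map]
      simp only [List.map_cons, List.map_map]
      congr 1
      · exact congrArg₂ _ (by cases r <;> simp [List.getD]) (List.map_congr_left fun a _ => by cases a <;> simp [List.getD])
      · apply List.map_congr_left
        intro j hj
        simp [Function.comp, List.getD, List.getElem?_tail]

-- rows of a modify survive a length invariant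
theorem pv_rows_modify {L : Nat} (M : List (List Int)) (a : Nat) (f : List Int → List Int)
    (hf : ∀ r, (f r).length = r.length) (h : ∀ r ∈ M, r.length = L) :
    ∀ r ∈ M.modify a f, r.length = L := by
  intro r hr
  rw [List.mem_iff_getElem] at hr
  obtain ⟨i, hi, rfl⟩ := hr
  rw [List.getElem_modify]
  split_ifs
  · rw [hf]; exact h _ (List.getElem_mem _)
  · exact h _ (List.getElem_mem _)

-- pvStepA equals B's direct row construction on rectangular input of side 2^mm+1
theorem pv_step_eq_combine (prev : List (List Int)) (mm : Nat) (hmm : 2 ≤ mm)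
    (hrect : pvRect prev (2 ^ mm + 1)) :
    pvStepA prev mm =
      ((((prev.map (fun row => row ++ row.tail))
          ++ (List.range' 1 (prev.length - 1)).map (fun ii =>
               prev.reverse.map (fun r => r.getD ii 0)
                 ++ (prev.map (fun r => r.getD (prev.length - 1 - ii) 0)).tail)).modify
            (prev.length - 1) (fun row => row.set 1 1)).modify
            (prev.length - 2) (fun row => row.set (prev.length - 1) 1)).modify
            (prev.length - 1) (fun row => row.set (2 * prev.length - 3) 1) := by
  obtain ⟨hlen, hrow⟩ := hrect
  have hS5 : 5 ≤ prev.length := by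
    have h4 : 2 ^ 2 ≤ 2 ^ mm := Nat.pow_le_pow_right (by norm_num) hmm
    omega
  have hpow : 2 ^ mm = prev.length - 1 := by omega
  have hpow1 : 2 ^ mm - 1 = prev.length - 2 := by omega
  have hpow2 : 2 ^ (mm + 1) - 1 = 2 * prev.length - 3 := by rw [pow_succ]; omega
  have hne : prev ≠ [] := List.ne_nil_of_length_pos (by omega)
  have hrow' : ∀ r ∈ prev, r.length = prev.length := fun r hr => by rw [hrow r hr]; omega
  have h_ld : pvTZip prev.reverse
      = (List.range prev.length).map (fun q => prev.reverse.map (fun r => r.getD q 0)) := by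
    have := pv_tzip_spec prev.length prev.reverse
      (by simpa using hne) (fun r hr => hrow' r (List.mem_reverse.mp hr))
    simpa using this
  have h_rd : pvTZip prev
      = (List.range prev.length).map (fun q => prev.map (fun r => r.getD q 0)) := by
    exact pv_tzip_spec prev.length prev hne hrow'
  have h_down : List.zipWith (fun l r => l ++ r.tail) (pvTZip prev.reverse) ((pvTZip prev).reverse)
      = (List.range prev.length).map (fun k =>
          (prev.reverse.map (fun r => r.getD k 0))
            ++ ((prev.map (fun r => r.getD (prev.length - 1 - k) 0)).tail)) := by
    rw [h_ld, h_rd]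
    apply List.ext_getElem?
    intro q
    by_cases hq : q < prev.length
    · rw [List.getElem?_zipWith, List.getElem?_map, List.getElem?_range hq,
        List.getElem?_reverse (by simpa using hq), List.length_map, List.length_range,
        List.getElem?_map, List.getElem?_range (by omega),
        List.getElem?_map, List.getElem?_range hq]
      rfl
    · rw [List.getElem?_eq_none (by simp [List.length_zipWith]; omega),
        List.getElem?_eq_none (by simp; omega)]
  have htail : ((List.range prev.length).map (fun k =>
          (prev.reverse.map (fun r => r.getD k 0))
            ++ ((prev.map (fun r => r.getD (prev.length - 1 - k) 0)).tail))).tail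
      = (List.range' 1 (prev.length - 1)).map (fun k =>
          (prev.reverse.map (fun r => r.getD k 0))
            ++ ((prev.map (fun r => r.getD (prev.length - 1 - k) 0)).tail)) := by
    obtain ⟨k, hk⟩ : ∃ k, prev.length = k + 1 := ⟨prev.length - 1, by omega⟩
    rw [hk, List.range_eq_range', List.range'_succ]
    simp
  simp only [pvStepA]
  rw [h_down, htail, hpow2, hpow1, hpow]

-- alt produces rectangular mazes of side 2^(n+1)+1 (for n ≥ 1)
theorem pv_alt_rect : ∀ n : Int, 1 ≤ n → pvRect (hilbert_maze_array_alt n) (2 ^ (n.toNat + 1) + 1) := by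
  suffices H : ∀ k, ∀ n : Int, n.toNat = k → 1 ≤ n → pvRect (hilbert_maze_array_alt n) (2 ^ (n.toNat + 1) + 1) by
    intro n h; exact H n.toNat n rfl h
  intro k
  induction k with
  | zero => intro n hk h1; omega
  | succ k ih =>
    intro n hk h1
    by_cases hn1 : n ≤ 1
    · have hn : n = 1 := by omega
      subst hn
      rw [hilbert_maze_array_alt, if_pos le_rfl]
      exact ⟨by decide, by decide⟩
    · rw [hilbert_maze_array_alt, if_neg hn1]
      obtain ⟨hl, hr⟩ := ih (n - 1) (by omega) (by omega)
      have he : (n - 1).toNat + 1 = n.toNat := by omega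
      rw [he] at hl hr
      constructor
      · simp only [List.length_modify, List.length_append, List.length_map,
          List.length_range', hl]
        rw [pow_succ]
        omega
      · refine pv_rows_modify _ _ _ (fun r => by simp) ?_
        refine pv_rows_modify _ _ _ (fun r => by simp) ?_
        refine pv_rows_modify _ _ _ (fun r => by simp) ?_
        intro r hrm
        rw [List.mem_append] at hrm
        rcases hrm with hm | hm <;> rw [List.mem_map] at hm <;> obtain ⟨x, hx, rfl⟩ := hm
        · have hx2 := hr x hx
          simp only [List.length_append, List.length_tail, hx2]
          rw [pow_succ]; omega
        · simp only [List.length_append, List.length_tail, List.length_map,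
            List.length_reverse, hl]
          rw [pow_succ]; omega

-- the loop peels its LAST iteration
theorem pv_loop_last : ∀ n m : Int, m < n → ∀ maze,
    pvLoopA n m maze = pvStepA (pvLoopA (n - 1) m maze) n.toNat := by
  intro n
  suffices H : ∀ k (m : Int), (n - m).toNat = k → m < n → ∀ maze,
      pvLoopA n m maze = pvStepA (pvLoopA (n - 1) m maze) n.toNat by
    intro m hm maze; exact H (n - m).toNat m rfl hm maze
  intro k
  induction k with
  | zero => intro m hk hm; omega
  | succ k ih =>
    intro m hk hm maze
    rw [pvLoopA, if_pos hm]
    by_cases h2 : m + 1 < n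
    · rw [ih (m + 1) (by omega) h2]
      conv_rhs => rw [pvLoopA]
      rw [if_pos (show m < n - 1 by omega)]
    · have hn : m + 1 = n := by omega
      rw [pvLoopA, if_neg (by omega)]
      conv_rhs => rw [pvLoopA]
      rw [if_neg (show ¬ m < n - 1 by omega), hn]

theorem pv_main : ∀ n : Int, 1 ≤ n → pvLoopA n 1 pvBase = hilbert_maze_array_alt n := by
  suffices H : ∀ k, ∀ n : Int, n.toNat = k → 1 ≤ n → pvLoopA n 1 pvBase = hilbert_maze_array_alt n by
    intro n h; exact H n.toNat n rfl h
  intro k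
  induction k with
  | zero => intro n hk h1; omega
  | succ k ih =>
    intro n hk h1
    by_cases hn1 : n ≤ 1
    · have hn : n = 1 := by omega
      subst hn
      rw [pvLoopA, if_neg (by omega), hilbert_maze_array_alt, if_pos le_rfl]
    · rw [pv_loop_last n 1 (by omega)]
      rw [ih (n - 1) (by omega) (by omega)]
      have hrect := pv_alt_rect (n - 1) (by omega)
      have he : (n - 1).toNat + 1 = n.toNat := by omega
      rw [he] at hrect
      rw [pv_step_eq_combine _ n.toNat (by omega) hrect]
      conv_rhs => rw [hilbert_maze_array_alt, if_neg hn1]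

-- ===== VERDICT (by name: the statement is the Claim_ definition above) =====
theorem hilbert_maze_array_spec : Claim_equal_hilbert_maze_array := by
  intro n _
  unfold Spec_hilbert_maze_array hilbert_maze_array
  by_cases h1 : n = 1
  · subst h1; simp [hilbert_maze_array_alt]
  · simp only [if_neg h1]
    by_cases h2 : 1 ≤ n
    · have := pv_main n h2
      exact this
    · rw [pvLoopA, if_neg (by omega), hilbert_maze_array_alt, if_pos (by omega)]
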